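-- pv_equiv track=rewrite | github.com/BenjaminSchaaf/PythonRaytracingVsRasterization | common/ObjImporter.py | __split_objects
-- ===== SOURCE A (Python) =====
-- def __split_objects(lines):
--     objects = []
--
--     index = 0
--     last_index = 0
--     while index < len(lines):
--         values = lines[index].split(" ")
--         index += 1
--
--         if values[0] == "o":
--             objects.append(lines[last_index:index])
--             last_index = index
--     objects.append(lines[last_index:])
--
--     return objects
-- ===== SOURCE B (Python) =====
-- def __split_objects(lines):
--     # Build the groups back-to-front: walk the lines in reverse, accumulating the
--     # current group in reversed order; an 'o' marker line is the LAST line of its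
--     # group, so seen backwards it closes the accumulated group and starts a new one.
--     rev_groups = []
--     cur = []
--     for line in reversed(lines):
--         if line.split(" ")[0] == "o":
--             rev_groups.append(cur)
--             cur = [line]
--         else:
--             cur.append(line)
--     rev_groups.append(cur)
--     return [g[::-1] for g in reversed(rev_groups)]
-- ===== Notes on version B (the rewrite author's own statement) =====
-- stated objective: alternative
-- what changed: A scans forward with index/last_index and appends slices of the input at each 'o' marker; B constructs the groups back-to-front by a reversed traversal, accumulating each group in reversed order and closing it when its trailing 'o' marker is reached, then reversing groups and order at the end, with no slicing or index bookkeeping.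
import Mathlib
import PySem

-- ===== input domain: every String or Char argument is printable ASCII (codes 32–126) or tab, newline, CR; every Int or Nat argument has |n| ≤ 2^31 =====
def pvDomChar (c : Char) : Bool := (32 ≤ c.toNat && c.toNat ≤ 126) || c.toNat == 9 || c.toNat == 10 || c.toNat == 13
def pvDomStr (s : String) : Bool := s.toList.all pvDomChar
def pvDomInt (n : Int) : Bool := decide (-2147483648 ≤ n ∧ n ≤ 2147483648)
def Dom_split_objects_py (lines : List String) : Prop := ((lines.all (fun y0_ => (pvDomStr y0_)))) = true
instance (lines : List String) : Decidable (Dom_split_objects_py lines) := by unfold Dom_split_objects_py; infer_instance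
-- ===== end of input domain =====

-- B replaces A's forward index/slice scan by a back-to-front construction (a right fold
-- over the lines); same O(n) cost, no slicing or index bookkeeping.

-- ===== PORT A =====
-- while-loop over index/last_index; slices lines[last_index:index] have natural bounds
-- (last_index ≤ index ≤ len), where Python's slice is exactly drop/take, and lines[index]
-- is in range by the loop guard (getD default never used).
def splitObjectsLoopA (lines : List String) (objects : List (List String))
    (index lastIndex : Nat) : List (List String) :=
  if index < lines.length then
    let values := (PySem.Str.split? (lines.getD index "") " ").getD []
    if values.getD 0 "" == "o" then
      splitObjectsLoopA lines (objects ++ [(lines.drop lastIndex).take (index + 1 - lastIndex)])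
        (index + 1) (index + 1)
    else
      splitObjectsLoopA lines objects (index + 1) lastIndex
  else
    objects ++ [lines.drop lastIndex]
termination_by lines.length - index

def split_objects_py (lines : List String) : List (List String) :=
  splitObjectsLoopA lines [] 0 0

-- ===== PORT B =====
-- body of B's reversed loop: a marker closes the accumulated group and starts a new
-- one holding just the marker; otherwise the line joins the current (reversed) group.
def splitObjectsStepB (st : List (List String) × List String) (line : String) :
    List (List String) × List String :=
  if ((PySem.Str.split? line " ").getD []).getD 0 "" == "o" then
    (st.1 ++ [st.2], [line])
  else
    (st.1, st.2 ++ [line])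

-- 'for line in reversed(lines)' threading (rev_groups, cur) = foldl over lines.reverse;
-- g[::-1] is ported as List.reverse (exact: full negative-step-one slice = reversal).
def split_objects_py_alt (lines : List String) : List (List String) :=
  let st := lines.reverse.foldl splitObjectsStepB ([], [])
  ((st.1 ++ [st.2]).reverse).map List.reverse

-- ===== PRECONDITION & SPEC =====
def Spec_split_objects_py (lines : List String) (out : List (List String)) : Prop := out = split_objects_py_alt lines
instance (lines : List String) (out : List (List String)) : Decidable (Spec_split_objects_py lines out) := by unfold Spec_split_objects_py; infer_instance

-- ===== CLAIM (what is proved, stated in full; the proofs are below) =====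
def Claim_equal_split_objects_py : Prop := ∀ (lines : List String), Dom_split_objects_py lines → Spec_split_objects_py lines (split_objects_py lines)

-- ===== LEMMAS AND PROOFS =====

-- proof-side: is this line an 'o' marker?
def pvMarker (l : String) : Bool := ((PySem.Str.split? l " ").getD []).getD 0 "" == "o"

-- proof-side common shape: groups of the remaining lines, given the current partial group
def pvGroups : List String → List String → List (List String)
  | [], cur => [cur]
  | l :: rest, cur => if pvMarker l then (cur ++ [l]) :: pvGroups rest [] else pvGroups rest (cur ++ [l])

theorem loopA_eq (lines : List String) :
    ∀ (n index lastIndex : Nat) (objects : List (List String)),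
      lines.length - index = n → lastIndex ≤ index → index ≤ lines.length →
      splitObjectsLoopA lines objects index lastIndex
        = objects ++ pvGroups (lines.drop index) ((lines.drop lastIndex).take (index - lastIndex)) := by
  intro n
  induction n with
  | zero =>
    intro index lastIndex objects hn hj hi
    have hIdx : index = lines.length := by omega
    subst hIdx
    have htake : (lines.drop lastIndex).take (lines.length - lastIndex) = lines.drop lastIndex :=
      List.take_of_length_le (by simp)
    rw [splitObjectsLoopA]
    simp [pvGroups, htake]
  | succ n ih =>
    intro index lastIndex objects hn hj hi
    have hlt : index < lines.length := by omega
    have hdrop : lines.drop index = lines[index] :: lines.drop (index + 1) :=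
      List.drop_eq_getElem_cons hlt
    have hget : lines.getD index "" = lines[index] := List.getD_eq_getElem lines "" hlt
    have htake : (lines.drop lastIndex).take (index + 1 - lastIndex)
        = (lines.drop lastIndex).take (index - lastIndex) ++ [lines[index]] := by
      have h1 : index + 1 - lastIndex = (index - lastIndex) + 1 := by omega
      rw [h1, List.take_add_one]
      have h2 : (lines.drop lastIndex)[index - lastIndex]? = some lines[index] := by
        rw [List.getElem?_drop]
        have : lastIndex + (index - lastIndex) = index := by omega
        rw [this, List.getElem?_eq_getElem hlt]
      simp [h2]
    rw [splitObjectsLoopA]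
    simp only [hlt, if_pos, hget]
    by_cases hm : pvMarker lines[index]
    · have hm' : (((PySem.Str.split? lines[index] " ").getD []).getD 0 "" == "o") = true := hm
      rw [if_pos hm', ih (index + 1) (index + 1) _ (by omega) (by omega) (by omega)]
      rw [hdrop]
      simp [pvGroups, hm, htake]
    · have hm' : ¬ (((PySem.Str.split? lines[index] " ").getD []).getD 0 "" == "o") = true := hm
      rw [if_neg hm', ih (index + 1) lastIndex _ (by omega) (by omega) (by omega)]
      rw [hdrop]
      simp [pvGroups, hm, htake]

theorem pvGroups_eq_foldr (lines : List String) :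
    ∀ (cur : List String),
      pvGroups lines cur
        = (cur ++ (List.foldr (fun x st => splitObjectsStepB st x) ([], []) lines).2.reverse) ::
            ((List.foldr (fun x st => splitObjectsStepB st x) ([], []) lines).1.reverse.map List.reverse) := by
  induction lines with
  | nil => intro cur; simp [pvGroups]
  | cons l rest ih =>
    intro cur
    rw [List.foldr_cons]
    simp only [pvGroups]
    by_cases hm : pvMarker l
    · have hm' : (((PySem.Str.split? l " ").getD []).getD 0 "" == "o") = true := hm
      have hs : splitObjectsStepB (List.foldr (fun x st => splitObjectsStepB st x) ([], []) rest) l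
          = ((List.foldr (fun x st => splitObjectsStepB st x) ([], []) rest).1
              ++ [(List.foldr (fun x st => splitObjectsStepB st x) ([], []) rest).2], [l]) := by
        unfold splitObjectsStepB; rw [if_pos hm']
      rw [if_pos hm, hs, ih []]
      simp
    · have hm' : ¬ (((PySem.Str.split? l " ").getD []).getD 0 "" == "o") = true := hm
      have hs : splitObjectsStepB (List.foldr (fun x st => splitObjectsStepB st x) ([], []) rest) l
          = ((List.foldr (fun x st => splitObjectsStepB st x) ([], []) rest).1,
             (List.foldr (fun x st => splitObjectsStepB st x) ([], []) rest).2 ++ [l]) := by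
        unfold splitObjectsStepB; rw [if_neg hm']
      rw [if_neg hm, hs, ih (cur ++ [l])]
      simp

-- ===== VERDICT (by name: the statement is the Claim_ definition above) =====
theorem split_objects_py_spec : Claim_equal_split_objects_py := by
  intro lines _
  unfold Spec_split_objects_py split_objects_py split_objects_py_alt
  rw [loopA_eq lines (lines.length) 0 0 [] (by omega) (by omega) (by omega)]
  simp only [List.drop_zero, Nat.sub_self, List.take_zero, List.nil_append]
  rw [List.foldl_reverse, pvGroups_eq_foldr lines []]
  simp
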